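-- pv_equiv track=rewrite | github.com/lichangao1826/ml-contest | run/data_fountain_529_senta/predict.py | merge_k_fold_result
-- ===== SOURCE A (Python) =====
-- def merge_k_fold_result(k_fold_result):
--     k, n = len(k_fold_result), len(k_fold_result[0])
--     result = []
--     for i in range(n):
--         qid = k_fold_result[0][i][0][0]
--         labels = {}
--         for j in range(k):
--             label = k_fold_result[j][i][1]
--             labels[label] = labels.get(label, 0) + 1
--         labels = sorted(labels.items(), key=lambda x: x[1], reverse=True)
--         label = labels[0][0] if labels[0][1] > k // 2 else 2
--         result.append([qid, label])
--     return result
-- ===== SOURCE B (Python) =====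
-- def merge_k_fold_result(k_fold_result):
--     result = []
--     for row in zip(*k_fold_result):
--         qid = row[0][0][0]
--         labels = [entry[1] for entry in row]
--         cand, cnt = 0, 0
--         for label in labels:
--             if cnt == 0:
--                 cand, cnt = label, 1
--             elif label == cand:
--                 cnt += 1
--             else:
--                 cnt -= 1
--         result.append([qid, cand if 2 * labels.count(cand) > len(row) else 2])
--     return result
-- ===== Notes on version B (the rewrite author's own statement) =====
-- stated objective: alternative
-- what changed: B transposes the folds with zip(*k_fold_result) and, per question row, replaces the frequency dict + descending sort with Boyer-Moore majority voting (candidate/counter sweep) verified by labels.count against the strict-majority threshold.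
import Mathlib
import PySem

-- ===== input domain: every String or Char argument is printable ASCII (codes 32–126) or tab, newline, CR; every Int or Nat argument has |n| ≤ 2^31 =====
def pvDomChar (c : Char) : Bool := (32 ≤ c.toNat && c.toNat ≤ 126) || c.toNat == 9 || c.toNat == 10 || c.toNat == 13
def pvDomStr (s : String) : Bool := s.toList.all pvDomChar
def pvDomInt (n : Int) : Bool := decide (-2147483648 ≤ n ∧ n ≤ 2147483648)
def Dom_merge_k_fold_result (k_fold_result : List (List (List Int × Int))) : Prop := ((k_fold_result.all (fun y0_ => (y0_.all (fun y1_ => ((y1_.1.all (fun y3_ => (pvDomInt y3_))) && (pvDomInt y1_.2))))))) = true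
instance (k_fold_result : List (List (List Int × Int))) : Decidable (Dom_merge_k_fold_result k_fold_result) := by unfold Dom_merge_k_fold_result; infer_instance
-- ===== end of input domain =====

-- B transposes the data with zip(*k_fold_result) and, per question row, replaces A's
-- frequency dict + descending sort with Boyer-Moore majority voting verified by a count:
-- an alternative algorithm (no dict, no sort).

-- ===== PORT A =====
-- A-side helpers: k_fold_result[j][i][1] and k_fold_result[0][i][0][0]; the pyGetD
-- defaults are hit only outside Pre_merge_k_fold_result (where Python raises IndexError).
def pvLab (k_fold_result : List (List (List Int × Int))) (i j : Int) : Int :=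
  (PySem.List.pyGetD (PySem.List.pyGetD k_fold_result j []) i ([], 0)).2

def pvQid (k_fold_result : List (List (List Int × Int))) (i : Int) : Int :=
  PySem.List.pyGetD (PySem.List.pyGetD (PySem.List.pyGetD k_fold_result 0 []) i ([], 0)).1 0 0

-- the body of A's outer loop: dict of counts, sorted by count descending, pick / fall back to 2
def pvRowA (k_fold_result : List (List (List Int × Int))) (k i : Int) : List Int :=
  let qid := pvQid k_fold_result i
  let labels : PySem.Dict Int Int := (PySem.List.pyRange 0 k 1).foldl (fun d j =>
      let label := pvLab k_fold_result i j
      d.insert label (d.getD label 0 + 1)) PySem.Dict.empty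
  let sortedLabels := PySem.List.sorted labels.items (fun x => x.2) true
  let label : Int := if (PySem.List.pyGetD sortedLabels 0 ((0 : Int), (0 : Int))).2 > PySem.Int.floordiv k 2
                     then (PySem.List.pyGetD sortedLabels 0 ((0 : Int), (0 : Int))).1 else 2
  [qid, label]

def merge_k_fold_result (k_fold_result : List (List (List Int × Int))) : List (List Int) :=
  let k : Int := k_fold_result.length
  let n : Int := (PySem.List.pyGetD k_fold_result 0 []).length
  (PySem.List.pyRange 0 n 1).foldl (fun result i => result ++ [pvRowA k_fold_result k i]) []

-- ===== PORT B =====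
-- hand-rolled port of Python's variadic zip(*xss) (tuples rendered as lists): exact —
-- it yields, for each i below the minimum length, the list of the i-th elements.
def pvTranspose (d : List Int × Int) (xss : List (List (List Int × Int))) : List (List (List Int × Int)) :=
  match xss with
  | [] => []
  | x :: rest =>
    (List.range (rest.foldl (fun m l => min m l.length) x.length)).map
      (fun i => (x :: rest).map (fun l => l.getD i d))

-- the body of B's loop over one transposed row: Boyer-Moore sweep, then count-verify
def pvRowB (row : List (List Int × Int)) : List Int :=
  let qid := PySem.List.pyGetD (PySem.List.pyGetD row 0 ([], 0)).1 0 0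
  let labels := row.map (fun entry => entry.2)
  let cc := labels.foldl (fun s label =>
      if s.2 = 0 then (label, 1) else if label = s.1 then (s.1, s.2 + 1) else (s.1, s.2 - 1))
    ((0 : Int), (0 : Int))
  [qid, if 2 * (labels.count cc.1 : Int) > (row.length : Int) then cc.1 else 2]

def merge_k_fold_result_alt (k_fold_result : List (List (List Int × Int))) : List (List Int) :=
  (pvTranspose ([], 0) k_fold_result).map pvRowB

-- ===== PRECONDITION & SPEC =====
-- Pre_ excludes exactly the inputs where A raises IndexError: the empty list (k_fold_result[0]),
-- a fold shorter than the first one (k_fold_result[j][i]), or an empty first component of a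
-- first-fold entry (k_fold_result[0][i][0][0]).
def Pre_merge_k_fold_result (k_fold_result : List (List (List Int × Int))) : Prop :=
  k_fold_result ≠ [] ∧
  (∀ f ∈ k_fold_result, k_fold_result.headI.length ≤ f.length) ∧
  (∀ e ∈ k_fold_result.headI, e.1 ≠ [])
instance (k_fold_result : List (List (List Int × Int))) : Decidable (Pre_merge_k_fold_result k_fold_result) := by unfold Pre_merge_k_fold_result; infer_instance
def pvWitness_merge_k_fold_result : (List (List (List Int × Int))) :=
  [[([7], 1), ([8], 0)], [([7], 1), ([8], 2)], [([7], 0), ([8], 2)]]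
def Spec_merge_k_fold_result (k_fold_result : List (List (List Int × Int))) (out : List (List Int)) : Prop := out = merge_k_fold_result_alt k_fold_result
instance (k_fold_result : List (List (List Int × Int))) (out : List (List Int)) : Decidable (Spec_merge_k_fold_result k_fold_result out) := by unfold Spec_merge_k_fold_result; infer_instance

-- ===== CLAIM (what is proved, stated in full; the proofs are below) =====
def Claim_equal_merge_k_fold_result : Prop := ∀ (k_fold_result : List (List (List Int × Int))), Dom_merge_k_fold_result k_fold_result → Pre_merge_k_fold_result k_fold_result → Spec_merge_k_fold_result k_fold_result (merge_k_fold_result k_fold_result)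

-- ===== LEMMAS AND PROOFS =====

-- Boyer-Moore step (the fused form of port B's inner loop body)
def bmStep (s : Int × Int) (a : Int) : Int × Int :=
  if s.2 = 0 then (a, 1) else if a = s.1 then (s.1, s.2 + 1) else (s.1, s.2 - 1)

-- pairing invariant over the remaining list, with an abstract prefix-count f bounded by L
theorem bm_aux (l : List Int) : ∀ (c n : Int) (f : Int → Int) (L : Int),
    0 ≤ n → (∀ x, 2 * f x ≤ L - n + (if x = c then 2 * n else 0)) →
    0 ≤ (l.foldl bmStep (c, n)).2 ∧
    ∀ x, 2 * (f x + (l.count x : Int)) ≤ (L + l.length) - (l.foldl bmStep (c, n)).2 +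
      (if x = (l.foldl bmStep (c, n)).1 then 2 * (l.foldl bmStep (c, n)).2 else 0) := by
  induction l with
  | nil =>
    intro c n f L hn hf
    refine ⟨hn, fun x => ?_⟩
    have := hf x
    simp only [List.foldl_nil, List.count_nil, List.length_nil] at *
    split_ifs at this ⊢ <;> (push_cast; omega)
  | cons a t ih =>
    intro c n f L hn hf
    simp only [List.foldl_cons]
    have hstep : ∃ c' n', bmStep (c, n) a = (c', n') ∧ 0 ≤ n' ∧
        ∀ x, 2 * (f x + (if x = a then 1 else 0)) ≤ (L + 1) - n' + (if x = c' then 2 * n' else 0) := by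
      by_cases h0 : n = 0
      · refine ⟨a, 1, by simp [bmStep, h0], by omega, fun x => ?_⟩
        have := hf x
        subst h0
        split_ifs at this ⊢ <;> omega
      · by_cases hac : a = c
        · refine ⟨c, n + 1, by simp [bmStep, h0, hac], by omega, fun x => ?_⟩
          have := hf x
          split_ifs at this ⊢ <;> simp_all <;> omega
        · refine ⟨c, n - 1, by simp [bmStep, h0, hac], by omega, fun x => ?_⟩
          have := hf x
          split_ifs at this ⊢ <;> simp_all <;> omega
    obtain ⟨c', n', heq, hn', hf'⟩ := hstep
    rw [heq]
    obtain ⟨h1, h2⟩ := ih c' n' (fun x => f x + (if x = a then 1 else 0)) (L + 1) hn' hf'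
    refine ⟨h1, fun x => ?_⟩
    have h3 := h2 x
    have hc : ((a :: t).count x : Int) = (t.count x : Int) + (if x = a then 1 else 0) := by
      rcases eq_or_ne x a with h | h
      · simp [h]
      · simp [h, Ne.symm h]
    rw [List.length_cons, hc]
    push_cast at h3 ⊢
    split_ifs at h3 ⊢ <;> omega

-- if some label occurs strictly more than half the time, Boyer-Moore finds it
theorem bm_maj (l : List Int) (x : Int) (hx : (l.length : Int) < 2 * (l.count x : Int)) :
    x = (l.foldl bmStep ((0 : Int), (0 : Int))).1 := by
  obtain ⟨h1, h2⟩ := bm_aux l 0 0 (fun _ => 0) 0 le_rfl (fun x => by simp)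
  have h3 := h2 x
  by_contra hne
  rw [if_neg hne] at h3
  omega

-- two distinct labels cannot both hold a strict majority
theorem count_two_le (l : List Int) (a b : Int) (hab : a ≠ b) :
    l.count a + l.count b ≤ l.length := by
  induction l with
  | nil => simp
  | cons y t ih =>
    simp only [List.count_cons, List.length_cons, beq_iff_eq]
    have hcase : ¬ (y = a ∧ y = b) := fun ⟨h1, h2⟩ => hab (h1.symm.trans h2)
    split_ifs with h1 h2
    · exact absurd ⟨h1, h2⟩ hcase
    · omega
    · omega
    · omega

-- the per-question pick: A's dict-sort pick equals B's Boyer-Moore count-verify pick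
theorem pick_eq (ls : List Int) (hne : ls ≠ []) :
    (if (PySem.List.pyGetD (PySem.List.sorted (PySem.Dict.counter ls).items (fun x => x.2) true) 0 ((0:Int), (0:Int))).2 > PySem.Int.floordiv ls.length 2
     then (PySem.List.pyGetD (PySem.List.sorted (PySem.Dict.counter ls).items (fun x => x.2) true) 0 ((0:Int), (0:Int))).1 else 2)
    = (if 2 * ((ls.count (ls.foldl bmStep ((0:Int), (0:Int))).1 : Int)) > (ls.length : Int)
       then (ls.foldl bmStep ((0:Int), (0:Int))).1 else 2) := by
  have hitems : (PySem.Dict.counter ls).items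
      = (PySem.Set.ofList ls).map (fun c => (c, (ls.count c : Int))) := PySem.Dict.items_counter ls
  have hfd : PySem.Int.floordiv (ls.length : Int) 2 = ((ls.length / 2 : Nat) : Int) := by
    exact_mod_cast PySem.Int.floordiv_natCast ls.length 2
  have hsne : PySem.List.sorted (PySem.Dict.counter ls).items (fun x => x.2) true ≠ [] := by
    rw [Ne, PySem.List.sorted_eq_nil_iff, hitems]
    cases ls with
    | nil => exact absurd rfl hne
    | cons a t =>
      intro hmap
      have : a ∈ PySem.Set.ofList (a :: t) := (PySem.Set.mem_ofList _ _).mpr (List.mem_cons_self)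
      simp_all
  obtain ⟨m, t, hm⟩ := List.exists_cons_of_ne_nil hsne
  rw [hm, PySem.List.pyGetD_zero_cons]
  have hmmem : m ∈ (PySem.Dict.counter ls).items := by
    have : m ∈ PySem.List.sorted (PySem.Dict.counter ls).items (fun x => x.2) true :=
      hm ▸ List.mem_cons_self
    exact (PySem.List.mem_sorted _ _ _ _).mp this
  have hm2 : m.2 = (ls.count m.1 : Int) := by
    rw [hitems] at hmmem
    obtain ⟨c0, _, hc0⟩ := List.mem_map.mp hmmem
    rw [← hc0]
  have hmax : ∀ y ∈ (PySem.Dict.counter ls).items, y.2 ≤ m.2 :=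
    fun y hy => PySem.List.key_head_sorted_rev_ge _ _ hm y hy
  set cand := (ls.foldl bmStep ((0:Int), (0:Int))).1 with hcand
  by_cases hmaj : (ls.length : Int) < 2 * (ls.count m.1 : Int)
  · have hcm : m.1 = cand := bm_maj ls m.1 hmaj
    have hA : m.2 > PySem.Int.floordiv (ls.length : Int) 2 := by rw [hm2, hfd]; omega
    have hB : 2 * ((ls.count cand : Int)) > (ls.length : Int) := by rw [← hcm]; omega
    rw [if_pos hA, if_pos hB, hcm]
  · have hA : ¬ m.2 > PySem.Int.floordiv (ls.length : Int) 2 := by rw [hm2, hfd]; omega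
    have hB : ¬ 2 * ((ls.count cand : Int)) > (ls.length : Int) := by
      intro hgt
      have hpos : 0 < ls.count cand := by omega
      have hmem : cand ∈ ls := List.count_pos_iff.mp hpos
      have hin : (cand, (ls.count cand : Int)) ∈ (PySem.Dict.counter ls).items := by
        rw [hitems]
        exact List.mem_map_of_mem ((PySem.Set.mem_ofList _ _).mpr hmem)
      have hle := hmax _ hin
      rw [hm2] at hle
      rcases eq_or_ne m.1 cand with h | h
      · rw [← h] at hgt; omega
      · have hsum := count_two_le ls m.1 cand h
        omega
    rw [if_neg hA, if_neg hB]

-- folding min over lengths that are all at least a yields a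
theorem foldl_min_of_le (rest : List (List (List Int × Int))) : ∀ (a : Nat),
    (∀ l ∈ rest, a ≤ l.length) → rest.foldl (fun m l => min m l.length) a = a := by
  induction rest with
  | nil => intro a _; rfl
  | cons y t ih =>
    intro a h
    simp only [List.foldl_cons]
    rw [min_eq_left (h y List.mem_cons_self)]
    exact ih a (fun l hl => h l (List.mem_cons_of_mem y hl))

-- the two row bodies agree at every index i
theorem row_eq (x : List (List Int × Int)) (rest : List (List (List Int × Int))) (i : Nat) :
    pvRowA (x :: rest) ((x :: rest).length : Int) (i : Int)
      = pvRowB ((x :: rest).map (fun l => l.getD i ([], 0))) := by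
  set kfr := x :: rest with hkfr
  set row := kfr.map (fun l => l.getD i ([], 0)) with hrow
  -- labels lists coincide
  have hls : (PySem.List.pyRange 0 (kfr.length : Int) 1).map (pvLab kfr (i : Int))
      = row.map (fun entry => entry.2) := by
    have h1 : (PySem.List.pyRange 0 (kfr.length : Int) 1).map (fun j => PySem.List.pyGetD kfr j [])
        = kfr := PySem.List.map_pyGetD_pyRange_zero kfr []
    have h2 : (PySem.List.pyRange 0 (kfr.length : Int) 1).map (pvLab kfr (i : Int))
        = ((PySem.List.pyRange 0 (kfr.length : Int) 1).map (fun j => PySem.List.pyGetD kfr j [])).map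
            (fun f => (PySem.List.pyGetD f (i : Int) ([], 0)).2) := by
      rw [List.map_map]; rfl
    rw [h2, h1, hrow, List.map_map]
    apply List.map_congr_left
    intro f hf
    have : PySem.List.pyGetD f (i : Int) ([], 0) = f.getD i ([], 0) :=
      PySem.List.pyGetD_natCast f i ([], 0)
    simp only [Function.comp, this]
  -- qids coincide
  have hqid : pvQid kfr (i : Int) = PySem.List.pyGetD (PySem.List.pyGetD row 0 ([], 0)).1 0 0 := by
    have hhead : PySem.List.pyGetD kfr 0 [] = x := PySem.List.pyGetD_zero_cons x rest []
    have hrowhead : PySem.List.pyGetD row 0 ([], 0) = x.getD i ([], 0) := by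
      rw [hrow, hkfr, List.map_cons]
      exact PySem.List.pyGetD_zero_cons _ _ _
    rw [pvQid, hhead, hrowhead, PySem.List.pyGetD_natCast]
  -- dict-count fold is the counter of the labels list
  have hdict : ∀ ls : List Int, ls.foldl (fun d x => d.insert x (d.getD x 0 + 1)) PySem.Dict.empty
      = PySem.Dict.counter ls := fun ls => PySem.Dict.foldl_insert_getD_add_one_eq_counter ls
  have hrowlen : row.length = kfr.length := by rw [hrow, List.length_map]
  have hlslen : ((PySem.List.pyRange 0 (kfr.length : Int) 1).map (pvLab kfr (i : Int))).length
      = kfr.length := by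
    rw [List.length_map, PySem.List.length_pyRange_one]; omega
  set ls := (PySem.List.pyRange 0 (kfr.length : Int) 1).map (pvLab kfr (i : Int)) with hlsdef
  have hlsne : ls ≠ [] := by
    intro h; rw [h] at hlslen; simp [hkfr] at hlslen
  -- A's dict fold over pyRange is the counter of ls
  have hfoldA : (PySem.List.pyRange 0 (kfr.length : Int) 1).foldl (fun d j =>
      d.insert (pvLab kfr (i : Int) j) (d.getD (pvLab kfr (i : Int) j) 0 + 1)) PySem.Dict.empty
      = PySem.Dict.counter ls := by
    rw [hlsdef, ← hdict ls, hlsdef]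
    exact (List.foldl_map (f := pvLab kfr (i : Int))
      (g := fun (d : PySem.Dict Int Int) (y : Int) => d.insert y (d.getD y 0 + 1))).symm
  have hklen : ((kfr.length : Int)) = (ls.length : Int) := by rw [hlslen]
  simp only [pvRowA, pvRowB, hfoldA, hqid, ← hls]
  have hbm : ls.foldl (fun s label =>
      if s.2 = 0 then (label, 1) else if label = s.1 then (s.1, s.2 + 1) else (s.1, s.2 - 1))
      ((0 : Int), (0 : Int)) = ls.foldl bmStep ((0 : Int), (0 : Int)) := rfl
  rw [hbm]
  have hrl : ((row.length : Int)) = (ls.length : Int) := by rw [hrowlen, hlslen]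
  rw [hklen, hrl]
  rw [pick_eq ls hlsne]

-- ===== VERDICT (by name: the statement is the Claim_ definition above) =====
theorem merge_k_fold_result_spec : Claim_equal_merge_k_fold_result := by
  intro kfr _ hpre
  obtain ⟨hne, hmin, _⟩ := hpre
  cases kfr with
  | nil => exact absurd rfl hne
  | cons x rest =>
    have hmin' : ∀ f ∈ (x :: rest), x.length ≤ f.length := by
      intro f hf
      simpa using hmin f hf
    have hminlen : rest.foldl (fun m l => min m l.length) x.length = x.length :=
      foldl_min_of_le rest x.length (fun l hl => hmin' l (List.mem_cons_of_mem x hl))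
    have htr : pvTranspose ([], 0) (x :: rest)
        = (List.range x.length).map (fun i => (x :: rest).map (fun l => l.getD i ([], 0))) := by
      simp only [pvTranspose, hminlen]
    have hhead : PySem.List.pyGetD (x :: rest) 0 ([] : List (List Int × Int)) = x :=
      PySem.List.pyGetD_zero_cons x rest []
    unfold Spec_merge_k_fold_result merge_k_fold_result merge_k_fold_result_alt
    simp only [htr, hhead]
    rw [PySem.List.foldl_append_singleton_eq_map, List.nil_append]
    rw [PySem.List.pyRange_zero_natCast, List.map_map, List.map_map]
    apply List.map_congr_left
    intro i _
    exact row_eq x rest i
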